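-- pv_equiv track=rewrite | github.com/MatildeJPereira/SchemReader | schem_reader.py | byte_to_int
-- ===== SOURCE A (Python) =====
-- def byte_to_int(data):
--     proper_bytes = []
--     prev_byte = 0
--     for byte in data:
--         if prev_byte < 0:
--             prev_byte = 0
--             continue
--         if byte < 0:
--             prev_byte = byte
--             byte = 256 + byte
--         proper_bytes.append(byte)
--
--     return proper_bytes
-- ===== SOURCE B (Python) =====
-- def byte_to_int(data):
--     proper_bytes = []
--     it = iter(data)
--     for byte in it:
--         if byte < 0:
--             proper_bytes.append(256 + byte)
--             next(it, None)  # discard the element following a negative byte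
--         else:
--             proper_bytes.append(byte)
--     return proper_bytes
-- ===== Notes on version B (the rewrite author's own statement) =====
-- stated objective: simpler
-- what changed: Replaces the prev_byte skip-flag state machine with a manual iterator that, after translating a negative byte, directly consumes and discards the following element via next(it, None).
import Mathlib
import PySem

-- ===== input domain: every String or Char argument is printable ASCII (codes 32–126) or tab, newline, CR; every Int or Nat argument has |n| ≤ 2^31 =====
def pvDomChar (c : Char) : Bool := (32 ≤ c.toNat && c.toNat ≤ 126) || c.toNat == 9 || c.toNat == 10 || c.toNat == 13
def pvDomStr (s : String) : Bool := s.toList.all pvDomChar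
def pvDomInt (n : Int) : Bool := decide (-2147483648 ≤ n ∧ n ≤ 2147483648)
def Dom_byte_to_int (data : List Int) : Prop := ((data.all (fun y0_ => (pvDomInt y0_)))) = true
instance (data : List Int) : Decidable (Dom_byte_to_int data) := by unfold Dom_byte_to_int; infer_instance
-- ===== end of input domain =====

-- ===== PORT A =====
-- foldl over (proper_bytes, prev_byte), transliterating A's loop
def byte_to_int (data : List Int) : List Int :=
  (data.foldl (fun (s : List Int × Int) byte =>
    if s.2 < 0 then (s.1, 0)
    else if byte < 0 then (s.1 ++ [256 + byte], byte)
    else (s.1 ++ [byte], s.2)) ([], 0)).1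

-- ===== PORT B =====
-- iterator style: a negative byte is translated and the next element consumed
def byte_to_int_alt : List Int → List Int
  | [] => []
  | [b] => if b < 0 then [256 + b] else [b]
  | b :: c :: rest =>
    if b < 0 then (256 + b) :: byte_to_int_alt rest
    else b :: byte_to_int_alt (c :: rest)

-- ===== PRECONDITION & SPEC =====
def Spec_byte_to_int (data : List Int) (out : List Int) : Prop := out = byte_to_int_alt data
instance (data : List Int) (out : List Int) : Decidable (Spec_byte_to_int data out) := by unfold Spec_byte_to_int; infer_instance

-- ===== CLAIM (what is proved, stated in full; the proofs are below) =====
def Claim_equal_byte_to_int : Prop := ∀ (data : List Int), Dom_byte_to_int data → Spec_byte_to_int data (byte_to_int data)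

-- ===== LEMMAS AND PROOFS =====

lemma loop_eq (data : List Int) : ∀ (acc : List Int) (prev : Int), 0 ≤ prev →
    (data.foldl (fun (s : List Int × Int) byte =>
      if s.2 < 0 then (s.1, 0)
      else if byte < 0 then (s.1 ++ [256 + byte], byte)
      else (s.1 ++ [byte], s.2)) (acc, prev)).1 = acc ++ byte_to_int_alt data := by
  induction data using byte_to_int_alt.induct with
  | case1 => simp [byte_to_int_alt]
  | case2 b hb =>
    intro acc prev hp
    simp [byte_to_int_alt, List.foldl, not_lt.2 hp, hb]
  | case3 b hb =>
    intro acc prev hp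
    simp [byte_to_int_alt, List.foldl, not_lt.2 hp, hb]
  | case4 b c rest hb ih =>
    intro acc prev hp
    rw [List.foldl_cons, List.foldl_cons]
    simp only [if_neg (not_lt.2 hp), if_pos hb]
    rw [ih _ 0 le_rfl]
    simp [byte_to_int_alt, if_pos hb]
  | case5 b c rest hb ih =>
    intro acc prev hp
    rw [List.foldl_cons]
    simp only [if_neg (not_lt.2 hp), if_neg hb]
    rw [ih _ prev hp]
    simp [byte_to_int_alt, if_neg hb]

-- ===== VERDICT (by name: the statement is the Claim_ definition above) =====
theorem byte_to_int_spec : Claim_equal_byte_to_int := by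
  intro data _
  unfold Spec_byte_to_int byte_to_int
  simpa using loop_eq data [] 0 le_rfl
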